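-- pv_equiv track=rewrite | github.com/haiibarose/ComProgGrader | 09_MoreDC_34.py | pattern4
-- ===== SOURCE A (Python) =====
-- def pattern4(N):
--     ans = [[0 for i in range(N)] for j in range(N)]
--     value = 1
--     for j in range(N):
--         for i in range(N-1, -1, -1):
--             if i <= j:
--                 ans[i][j] += value
--                 value += 1
--     return ans
-- ===== SOURCE B (Python) =====
-- def pattern4(N):
--     # closed form: triangular-number offset per column plus within-column offset
--     return [[1 + j * (j + 1) // 2 + (j - i) if i <= j else 0 for j in range(N)]
--             for i in range(N)]
-- ===== Notes on version B (the rewrite author's own statement) =====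
-- stated objective: simpler
-- what changed: Replaces the zero matrix mutated through two nested loops with a running counter by a nested comprehension that computes each cell directly from a closed-form triangular-number formula.
import Mathlib
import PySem

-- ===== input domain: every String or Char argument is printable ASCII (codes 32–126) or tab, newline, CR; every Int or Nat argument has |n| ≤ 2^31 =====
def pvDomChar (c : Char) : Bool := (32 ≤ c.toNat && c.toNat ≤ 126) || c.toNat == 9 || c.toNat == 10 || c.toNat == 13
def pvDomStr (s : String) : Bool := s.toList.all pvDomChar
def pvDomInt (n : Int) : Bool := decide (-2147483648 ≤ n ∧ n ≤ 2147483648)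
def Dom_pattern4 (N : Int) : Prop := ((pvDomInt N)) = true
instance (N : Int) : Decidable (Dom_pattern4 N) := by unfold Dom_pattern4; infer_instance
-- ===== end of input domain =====

-- B replaces A's mutated zero matrix and running counter by a nested comprehension
-- computing each cell from the closed-form triangular-number formula (objective: simpler).

-- ===== PORT A =====
-- ans[i][j] += value: i and j are nonnegative and in range here, so .toNat + List.modify
-- is an exact rendering of the Python in-place update.
def pattern4 (N : Int) : List (List Int) :=
  let ans : List (List Int) :=
    (PySem.List.pyRange 0 N 1).map (fun _j => (PySem.List.pyRange 0 N 1).map (fun _i => (0 : Int)))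
  let r :=
    (PySem.List.pyRange 0 N 1).foldl
      (fun (st : List (List Int) × Int) j =>
        (PySem.List.pyRange (N - 1) (-1) (-1)).foldl
          (fun (st : List (List Int) × Int) i =>
            if i ≤ j then
              (st.1.modify i.toNat (fun row => row.modify j.toNat (fun v => v + st.2)), st.2 + 1)
            else st)
          st)
      (ans, 1)
  r.1

-- ===== PORT B =====
def pattern4_alt (N : Int) : List (List Int) :=
  (PySem.List.pyRange 0 N 1).map (fun i =>
    (PySem.List.pyRange 0 N 1).map (fun j =>
      if i ≤ j then 1 + PySem.Int.floordiv (j * (j + 1)) 2 + (j - i) else 0))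

-- ===== PRECONDITION & SPEC =====
def Spec_pattern4 (N : Int) (out : List (List Int)) : Prop := out = pattern4_alt N
instance (N : Int) (out : List (List Int)) : Decidable (Spec_pattern4 N out) := by unfold Spec_pattern4; infer_instance

-- ===== CLAIM (what is proved, stated in full; the proofs are below) =====
def Claim_equal_pattern4 : Prop := ∀ (N : Int), Dom_pattern4 N → Spec_pattern4 N (pattern4 N)

-- ===== LEMMAS AND PROOFS =====

-- grid of entries given by a function on (row, column) indices
def pvGrid (n : Nat) (e : Nat → Nat → Int) : List (List Int) :=
  (List.range n).map (fun i => (List.range n).map (fun j => e i j))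

-- A's inner-loop step for column j
def pvStep (j : Int) (st : List (List Int) × Int) (i : Int) : List (List Int) × Int :=
  if i ≤ j then
    (st.1.modify i.toNat (fun row => row.modify j.toNat (fun v => v + st.2)), st.2 + 1)
  else st

-- modifying one position of a map-over-range is a map with a pointwise if
theorem pvModify_map_range {α : Type} (n i : Nat) (f : Nat → α) (g : α → α) :
    ((List.range n).map f).modify i g
      = (List.range n).map (fun x => if x = i then g (f x) else f x) := by
  apply List.ext_getElem
  · simp [List.length_modify]
  · intro k h1 h2
    simp only [List.getElem_modify, List.getElem_map, List.getElem_range]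
    by_cases h : i = k <;> simp [h, eq_comm]

theorem pvGrid_modify (n i j : Nat) (e : Nat → Nat → Int) (v : Int)
    (g : Int → Int) :
    (pvGrid n e).modify i (fun row => row.modify j g)
      = pvGrid n (fun x y => if x = i ∧ y = j then g (e x y) else e x y) := by
  unfold pvGrid
  rw [pvModify_map_range]
  apply List.map_congr_left
  intro x _
  by_cases hx : x = i
  · subst hx
    rw [if_pos rfl, pvModify_map_range]
    apply List.map_congr_left
    intro y _
    by_cases hy : y = j <;> simp [hy]
  · simp [hx]

-- indices above j contribute nothing to the inner fold (the 'if i <= j' never fires)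
theorem pvInner_skip (j : Int) (hj : 0 ≤ j) (d : Nat) (st : List (List Int) × Int) :
    (PySem.List.pyRange (j + d) (-1) (-1)).foldl (pvStep j) st
      = (PySem.List.pyRange j (-1) (-1)).foldl (pvStep j) st := by
  induction d generalizing st with
  | zero => simp
  | succ d ih =>
    rw [show j + ((d + 1 : Nat) : Int) = (j + (d : Nat)) + 1 by push_cast; ring]
    rw [PySem.List.pyRange_neg_one_cons (by omega)]
    simp only [List.foldl_cons]
    rw [show pvStep j st (j + (d : Nat) + 1) = st by
      unfold pvStep; rw [if_neg (by omega)]]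
    calc (PySem.List.pyRange (j + (d:Nat) + 1 - 1) (-1) (-1)).foldl (pvStep j) st
        = (PySem.List.pyRange (j + (d:Nat)) (-1) (-1)).foldl (pvStep j) st := by norm_num
      _ = _ := ih st

-- active part of the inner loop: i from m-1 down to 0, all i ≤ k, each gets v, v+1, …
theorem pvInner_active (n k : Nat) (hk : k < n) (m : Nat) (hm : m ≤ k + 1) :
    ∀ (e : Nat → Nat → Int) (v : Int),
    (PySem.List.pyRange ((m : Int) - 1) (-1) (-1)).foldl (pvStep (k : Int)) (pvGrid n e, v)
      = (pvGrid n (fun i j => if j = k ∧ i < m then e i j + (v + ((m : Int) - 1 - (i : Int))) else e i j),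
         v + (m : Int)) := by
  induction m with
  | zero =>
    intro e v
    rw [PySem.List.pyRange_neg_one_eq_nil (by norm_num)]
    simp only [List.foldl_nil, Prod.mk.injEq]
    constructor
    · unfold pvGrid; apply List.map_congr_left; intro i _; apply List.map_congr_left
      intro j _; simp
    · push_cast; ring
  | succ m ih =>
    intro e v
    have hm' : m ≤ k + 1 := by omega
    rw [show ((m + 1 : Nat) : Int) - 1 = (m : Int) by push_cast; ring]
    rw [PySem.List.pyRange_neg_one_cons (by omega)]
    simp only [List.foldl_cons]
    rw [show pvStep (k : Int) (pvGrid n e, v) (m : Int)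
        = ((pvGrid n e).modify m (fun row => row.modify k (fun x => x + v)), v + 1) by
      unfold pvStep
      rw [if_pos (by exact_mod_cast Nat.le_of_lt_succ (by omega))]
      simp]
    rw [pvGrid_modify n m k e v]
    rw [ih hm' _ (v + 1)]
    simp only [Prod.mk.injEq]
    constructor
    · unfold pvGrid
      apply List.map_congr_left; intro i _
      apply List.map_congr_left; intro j _
      beta_reduce
      by_cases hj : j = k
      · subst hj
        generalize e i j = t
        split_ifs <;> push_cast <;> omega
      · simp [hj]
    · push_cast; ring

-- the whole inner loop on column k of an n×n grid
theorem pvInner (n k : Nat) (hk : k < n) (e : Nat → Nat → Int) (v : Int) :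
    (PySem.List.pyRange ((n : Int) - 1) (-1) (-1)).foldl (pvStep (k : Int)) (pvGrid n e, v)
      = (pvGrid n (fun i j => if j = k ∧ i ≤ k then e i j + (v + ((k : Int) - (i : Int))) else e i j),
         v + (k : Int) + 1) := by
  have hsplit : (n : Int) - 1 = (k : Int) + ((n - 1 - k : Nat) : Int) := by
    push_cast [Nat.cast_sub (by omega : k ≤ n - 1), Nat.cast_sub (by omega : 1 ≤ n)]; ring
  rw [hsplit, pvInner_skip (k : Int) (by positivity)]
  have hact := pvInner_active n k hk (k + 1) le_rfl e v
  simp only [show ((k + 1 : Nat) : Int) - 1 = (k : Int) by push_cast; ring] at hact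
  rw [hact]
  simp only [Prod.mk.injEq]
  constructor
  · unfold pvGrid
    apply List.map_congr_left; intro i _
    apply List.map_congr_left; intro j _
    beta_reduce
    by_cases hj : j = k
    · subst hj
      generalize e i j = t
      split_ifs <;> push_cast <;> omega
    · simp [hj]
  · push_cast; ring

-- closed-form entries: after the first k columns are processed
def pvE (k : Nat) (i j : Nat) : Int :=
  if j < k ∧ i ≤ j then 1 + ((j * (j + 1) / 2 : Nat) : Int) + ((j : Int) - (i : Int)) else 0

theorem pvTri_succ (k : Nat) : (k * (k + 1) / 2) + (k + 1) = (k + 1) * (k + 2) / 2 := by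
  have h2 : (k + 1) * (k + 2) = k * (k + 1) + 2 * (k + 1) := by ring
  obtain ⟨r, hr⟩ := Nat.even_mul_succ_self k
  omega

-- outer loop invariant
theorem pvOuter (n : Nat) (k : Nat) (hk : k ≤ n) :
    (PySem.List.pyRange 0 (k : Int) 1).foldl
      (fun st j => (PySem.List.pyRange ((n : Int) - 1) (-1) (-1)).foldl (pvStep j) st)
      (pvGrid n (fun _ _ => 0), 1)
      = (pvGrid n (pvE k), 1 + ((k * (k + 1) / 2 : Nat) : Int)) := by
  induction k with
  | zero =>
    simp only [Nat.cast_zero]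
    rw [PySem.List.pyRange_one_eq_nil le_rfl]
    simp only [List.foldl_nil, Prod.mk.injEq]
    constructor
    · unfold pvGrid; apply List.map_congr_left; intro i _; apply List.map_congr_left
      intro j _; simp [pvE]
    · norm_num
  | succ k ih =>
    have hk' : k ≤ n := by omega
    rw [show ((k + 1 : Nat) : Int) = (k : Int) + 1 by push_cast; ring]
    rw [PySem.List.pyRange_one_succ_right (by positivity), List.foldl_append]
    rw [ih hk']
    simp only [List.foldl_cons, List.foldl_nil]
    rw [pvInner n k (by omega) (pvE k) (1 + ((k * (k + 1) / 2 : Nat) : Int))]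
    simp only [Prod.mk.injEq]
    constructor
    · unfold pvGrid
      apply List.map_congr_left; intro i _
      apply List.map_congr_left; intro j _
      beta_reduce
      unfold pvE
      by_cases hj : j = k
      · subst hj
        generalize j * (j + 1) / 2 = a
        split_ifs <;> push_cast <;> omega
      · simp only [hj, false_and, if_false]
        generalize j * (j + 1) / 2 = a
        split_ifs <;> first | rfl | (push_cast; omega)
    · rw [← pvTri_succ k]; push_cast; ring

theorem pvFloordiv_tri (j : Nat) :
    PySem.Int.floordiv ((j : Int) * ((j : Int) + 1)) 2 = ((j * (j + 1) / 2 : Nat) : Int) := by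
  have : ((j : Int) * ((j : Int) + 1)) = ((j * (j + 1) : Nat) : Int) := by push_cast; ring
  rw [this, show (2 : Int) = ((2 : Nat) : Int) by norm_num, PySem.Int.floordiv_natCast]

-- pattern4 written with pvStep (definitional)
theorem pattern4_eq (N : Int) :
    pattern4 N =
      ((PySem.List.pyRange 0 N 1).foldl
        (fun st j => (PySem.List.pyRange (N - 1) (-1) (-1)).foldl (pvStep j) st)
        ((PySem.List.pyRange 0 N 1).map
          (fun _j => (PySem.List.pyRange 0 N 1).map (fun _i => (0 : Int))), 1)).1 := rfl

-- ===== VERDICT (by name: the statement is the Claim_ definition above) =====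
theorem pattern4_spec : Claim_equal_pattern4 := by
  intro N _
  unfold Spec_pattern4 pattern4_alt
  rw [pattern4_eq]
  by_cases hN : N ≤ 0
  · rw [PySem.List.pyRange_one_eq_nil hN]; simp
  · obtain ⟨n, rfl⟩ : ∃ n : Nat, N = (n : Int) := ⟨N.toNat, (Int.toNat_of_nonneg (by omega)).symm⟩
    have hrange := PySem.List.pyRange_zero_nat n
    have hans : ((PySem.List.pyRange 0 (n : Int) 1).map
        (fun _j => (PySem.List.pyRange 0 (n : Int) 1).map (fun _i => (0 : Int))))
        = pvGrid n (fun _ _ => 0) := by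
      unfold pvGrid
      rw [hrange]
      simp only [List.map_map]
      apply List.map_congr_left
      intro i _
      simp only [Function.comp]
      rfl
    rw [hans, pvOuter n n le_rfl]
    show pvGrid n (pvE n) = _
    unfold pvGrid pvE
    rw [hrange]
    simp only [List.map_map]
    apply List.map_congr_left
    intro i _
    apply List.map_congr_left
    intro j hj
    simp only [Function.comp_apply]
    beta_reduce
    rw [pvFloordiv_tri j]
    have hjn : j < n := List.mem_range.mp hj
    split_ifs <;> first | rfl | omega | (exfalso; omega)
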